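-- pv_equiv track=rewrite | github.com/bharadwajvyadavalli/coding_patterns | subsets.py | generate_parentheses_with_constraints
-- ===== SOURCE A (Python) =====
-- from typing import List, Set, Tuple
--
-- def generate_parentheses_with_constraints(n: int, must_include: str = "") -> List[str]:
--     """
--     LeetCode 22 Extension - Generate Parentheses with Constraints (Hard)
--
--     Generate all valid parentheses combinations.
--     Extended: Must include a specific substring pattern.
--
--     Algorithm:
--     1. Use backtracking with open/close counts
--     2. Check if current path can include required pattern
--     3. Prune invalid branches
--
--     Time: O(4^n / sqrt(n)), Space: O(n)
--
--     Example:
--     n = 3, must_include = "(())"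
--     Output: ["((()))", "(()())"] - only those containing "(())"
--     """
--     result = []
--
--     def is_valid_partial(s: str) -> bool:
--         """Check if partial string can lead to valid parentheses."""
--         balance = 0
--         for char in s:
--             if char == '(':
--                 balance += 1
--             else:
--                 balance -= 1
--             if balance < 0:
--                 return False
--         return True
--
--     def can_include_pattern(current: str, remaining_open: int,
--                             remaining_close: int) -> bool:
--         """Check if pattern can still be included."""
--         if must_include in current:
--             return True
--
--         # Check if we have enough remaining parentheses
--         total_remaining = remaining_open + remaining_close
--         if len(must_include) > len(current) + total_remaining:
--             return False
--
--         # More sophisticated check could be added here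
--         return True
--
--     def backtrack(current: str, open_count: int, close_count: int):
--         # Base case
--         if len(current) == 2 * n:
--             if not must_include or must_include in current:
--                 result.append(current)
--             return
--
--         # Pruning
--         if not can_include_pattern(current, n - open_count, n - close_count):
--             return
--
--         # Add opening parenthesis
--         if open_count < n:
--             backtrack(current + "(", open_count + 1, close_count)
--
--         # Add closing parenthesis
--         if close_count < open_count:
--             backtrack(current + ")", open_count, close_count + 1)
--
--     backtrack("", 0, 0)
--     return result
-- ===== SOURCE B (Python) =====
-- def generate_parentheses_with_constraints(n: int, must_include: str = ""):
--     # Iterative depth-first traversal with an explicit stack (no recursion):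
--     # an early-out when the required substring cannot fit in 2n characters,
--     # then pop a prefix, emit it if complete and it contains must_include,
--     # otherwise push the ')' extension then the '(' extension (so '(' is
--     # explored first, giving the same lexicographic output order).
--     result = []
--     if len(must_include) > 2 * n:
--         return result
--     stack = [("", 0, 0)]
--     while stack:
--         s, o, c = stack.pop()
--         if len(s) == 2 * n:
--             if must_include in s:
--                 result.append(s)
--             continue
--         if c < o:
--             stack.append((s + ")", o, c + 1))
--         if o < n:
--             stack.append((s + "(", o + 1, c))
--     return result
-- ===== Notes on version B (the rewrite author's own statement) =====
-- stated objective: alternative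
-- what changed: Replaced A's pruned depth-first backtracking recursion by an iterative depth-first loop over an explicit stack of (prefix, open, close) tuples (with a single root-level early-out when must_include cannot fit in 2n characters), pushing the ')' extension before the '(' extension so the same lexicographic output order falls out, with the must_include test at the leaves.
import Mathlib
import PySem

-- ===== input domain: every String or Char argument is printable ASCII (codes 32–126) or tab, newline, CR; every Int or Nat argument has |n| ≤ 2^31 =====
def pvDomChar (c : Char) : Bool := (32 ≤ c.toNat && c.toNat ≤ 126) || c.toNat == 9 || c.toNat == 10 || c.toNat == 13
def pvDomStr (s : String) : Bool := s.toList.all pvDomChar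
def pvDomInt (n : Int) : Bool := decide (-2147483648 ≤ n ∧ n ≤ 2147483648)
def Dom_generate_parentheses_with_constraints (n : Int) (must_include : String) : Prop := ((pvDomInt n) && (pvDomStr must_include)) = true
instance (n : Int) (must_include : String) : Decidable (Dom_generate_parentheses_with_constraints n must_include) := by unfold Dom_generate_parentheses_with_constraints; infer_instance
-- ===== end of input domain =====

-- B replaces A's pruned backtracking recursion by an iterative depth-first loop over
-- an explicit stack (objective: alternative; same cost and output, no recursion).

-- ===== PORT A =====
-- Python's `pat in s` substring test on strings, over List Char.
def pvContains (pat s : List Char) : Bool := decide (pat <:+: s)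

-- A's helper is_valid_partial is dead code (never called by A) and is not ported.
def canIncludePattern (must current : List Char) (remaining_open remaining_close : Int) : Bool :=
  if pvContains must current then true
  else if (must.length : Int) > (current.length : Int) + (remaining_open + remaining_close) then false
  else true

-- A's backtrack; the Nat fuel (2*n - len(current), = (2*n).toNat at the top call) is a
-- pure totality guard on the same recursion, never consulted on reachable states.
def backtrackA (must : List Char) (n : Int) (fuel : Nat) (current : List Char)
    (open_count close_count : Int) : List (List Char) :=
  if (current.length : Int) = 2 * n then
    (if must.isEmpty || pvContains must current then [current] else [])
  else
    match fuel with
    | 0 => []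
    | f + 1 =>
      if canIncludePattern must current (n - open_count) (n - close_count) = false then []
      else
        (if open_count < n then backtrackA must n f (current ++ ['(']) (open_count + 1) close_count else []) ++
        (if close_count < open_count then backtrackA must n f (current ++ [')']) open_count (close_count + 1) else [])

def generate_parentheses_with_constraints (n : Int) (must_include : String) : List String :=
  (backtrackA must_include.toList n (2 * n).toNat [] 0 0).map (fun l => String.mk l)

-- ===== PORT B =====
-- Source B's while-loop over the explicit stack (head = top of stack); the Nat fuel
-- bounds the number of pops (2^(2n+1) at the top call) and is a pure totality
-- guard, never consulted on reachable states.
def runStack (must : List Char) (n : Int) : Nat → List (List Char × Int × Int) → List (List Char)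
  | _, [] => []
  | 0, _ :: _ => []
  | f + 1, (s, o, c) :: rest =>
    if (s.length : Int) = 2 * n then
      (if pvContains must s then [s] else []) ++ runStack must n f rest
    else
      runStack must n f
        ((if o < n then [(s ++ ['('], o + 1, c)] else []) ++
         (if c < o then [(s ++ [')'], o, c + 1)] else []) ++ rest)

def generate_parentheses_with_constraints_alt (n : Int) (must_include : String) : List String :=
  if (must_include.toList.length : Int) > 2 * n then []
  else (runStack must_include.toList n (2 ^ ((2 * n).toNat + 1)) [([], 0, 0)]).map (fun l => String.mk l)

-- ===== PRECONDITION & SPEC =====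
-- Pre_ excludes exactly the inputs on which A RAISES: for n >= 499 with |must_include| <= 2n,
-- A's backtracking descends 2n+1 frames and overflows CPython's default recursion limit
-- (RecursionError). Every input on which A returns — including arbitrarily large n with
-- |must_include| > 2n, where A's root prune returns [] at once (as does B) — is inside Pre_.
def Pre_generate_parentheses_with_constraints (n : Int) (must_include : String) : Prop :=
  n ≤ 498 ∨ (must_include.toList.length : Int) > 2 * n
instance (n : Int) (must_include : String) : Decidable (Pre_generate_parentheses_with_constraints n must_include) := by unfold Pre_generate_parentheses_with_constraints; infer_instance
def pvWitness_generate_parentheses_with_constraints : Int × String := (2, "()")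

def Spec_generate_parentheses_with_constraints (n : Int) (must_include : String) (out : List String) : Prop := out = generate_parentheses_with_constraints_alt n must_include
instance (n : Int) (must_include : String) (out : List String) : Decidable (Spec_generate_parentheses_with_constraints n must_include out) := by unfold Spec_generate_parentheses_with_constraints; infer_instance

-- ===== CLAIM (what is proved, stated in full; the proofs are below) =====
def Claim_equal_generate_parentheses_with_constraints : Prop := ∀ (n : Int) (must_include : String), Dom_generate_parentheses_with_constraints n must_include → Pre_generate_parentheses_with_constraints n must_include → Spec_generate_parentheses_with_constraints n must_include (generate_parentheses_with_constraints n must_include)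

-- ===== LEMMAS AND PROOFS =====

-- All length-L strings over '('/')' in lexicographic order.
def allsL : Nat → List (List Char)
  | 0 => [[]]
  | k + 1 => (allsL k).map (('(') :: ·) ++ (allsL k).map ((')') :: ·)

-- A's branch guards, as a predicate on the remaining suffix.
def okb (N a b : Nat) : List Char → Bool
  | [] => true
  | ch :: t => if ch = '(' then decide (a < N) && okb N (a + 1) b t else decide (b < a) && okb N a (b + 1) t

theorem length_mem_allsL {L : Nat} {t : List Char} (h : t ∈ allsL L) : t.length = L := by
  induction L generalizing t with
  | zero => simp [allsL] at h; simp [h]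
  | succ k ih =>
    simp only [allsL, List.mem_append, List.mem_map] at h
    rcases h with ⟨u, hu, rfl⟩ | ⟨u, hu, rfl⟩ <;> simp [ih hu]

theorem pvContains_nil (s : List Char) : pvContains [] s = true := by
  simp [pvContains]

theorem orContains (must s : List Char) : (must.isEmpty || pvContains must s) = pvContains must s := by
  cases must with
  | nil => simp [pvContains_nil]
  | cons c t => simp [List.isEmpty]

theorem contains_length {must s : List Char} (h : pvContains must s = true) : must.length ≤ s.length := by
  simp only [pvContains, decide_eq_true_eq] at h
  exact h.length_le

theorem filter_and_const {α : Type} (c : Bool) (p : α → Bool) (l : List α) :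
    l.filter (fun t => c && p t) = if c then l.filter p else [] := by
  cases c <;> simp


-- Pure algebra: one level of the leaf-listing splits into the '(' and ')' branches.
theorem step_split (must : List Char) (N f a b : Nat) (s : List Char) :
    (((allsL (f + 1)).filter (okb N a b)).map (s ++ ·)).filter (pvContains must) =
    (if a < N then
      (((allsL f).filter (okb N (a + 1) b)).map ((s ++ ['(']) ++ ·)).filter (pvContains must)
     else []) ++
    (if b < a then
      (((allsL f).filter (okb N a (b + 1))).map ((s ++ [')']) ++ ·)).filter (pvContains must)
     else []) := by
  have hok1 : (okb N a b ∘ fun x => '(' :: x) = fun t => decide (a < N) && okb N (a + 1) b t := by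
    funext t; simp [Function.comp, okb]
  have hok2 : (okb N a b ∘ fun x => ')' :: x) = fun t => decide (b < a) && okb N a (b + 1) t := by
    funext t; simp [Function.comp, okb]
  simp only [allsL, List.filter_append, List.filter_map, List.map_append, List.map_map]
  rw [hok1, hok2, filter_and_const, filter_and_const]
  congr 1
  · rw [← List.filter_map]
    by_cases haN : a < N
    · rw [if_pos (decide_eq_true haN), if_pos haN, ← List.filter_map]
      congr 1
      apply List.map_congr_left
      intro t _
      simp
    · rw [if_neg (by simpa using haN), if_neg haN]
      simp
  · rw [← List.filter_map]
    by_cases hba : b < a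
    · rw [if_pos (decide_eq_true hba), if_pos hba, ← List.filter_map]
      congr 1
      apply List.map_congr_left
      intro t _
      simp
    · rw [if_neg (by simpa using hba), if_neg hba]
      simp

theorem backtrack_eq (must : List Char) (N : Nat) :
    ∀ (fuel : Nat) (cur : List Char) (a b : Nat), a ≤ N → b ≤ a → cur.length = a + b →
    a + b + fuel = 2 * N →
    backtrackA must (N : Int) fuel cur (a : Int) (b : Int) =
      (((allsL fuel).filter (okb N a b)).map (cur ++ ·)).filter (pvContains must) := by
  intro fuel
  induction fuel with
  | zero =>
    intro cur a b ha hb hlen hsum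
    have hg : (cur.length : Int) = 2 * (N : Int) := by rw [hlen]; push_cast; omega
    rw [backtrackA, if_pos hg, orContains]
    simp only [allsL]
    cases h : pvContains must cur <;> simp [okb, h]
  | succ f ih =>
    intro cur a b ha hb hlen hsum
    have hg : ¬ ((cur.length : Int) = 2 * (N : Int)) := by rw [hlen]; push_cast; omega
    rw [backtrackA, if_neg hg]
    by_cases hci : canIncludePattern must cur ((N : Int) - a) ((N : Int) - b) = false
    · -- prune fires: must not in cur and |must| > 2N; RHS all elements too short
      rw [if_pos hci]
      have hmust : must.length > 2 * N := by
        simp only [canIncludePattern] at hci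
        split at hci
        · simp at hci
        · split at hci
          · rename_i hgt
            rw [hlen] at hgt; push_cast at hgt; omega
          · simp at hci
      symm
      rw [List.filter_eq_nil_iff]
      intro s hs
      simp only [List.mem_map, List.mem_filter] at hs
      obtain ⟨t, ⟨htmem, _⟩, rfl⟩ := hs
      have hslen : (cur ++ t).length = 2 * N := by
        simp [hlen, length_mem_allsL htmem]; omega
      intro hcont
      have := contains_length hcont
      omega
    · rw [if_neg hci, step_split must N f a b cur]
      congr 1
      · by_cases haN : a < N
        · have hiN : (a : Int) < (N : Int) := by exact_mod_cast haN
          rw [if_pos hiN, if_pos haN,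
            (by push_cast; ring : ((a : Int) + 1) = ((a + 1 : Nat) : Int)),
            ih (cur ++ ['(']) (a + 1) b (by omega) (by omega) (by simp [hlen]; omega) (by omega)]
        · have hiN : ¬ ((a : Int) < (N : Int)) := by exact_mod_cast haN
          rw [if_neg hiN, if_neg haN]
      · by_cases hba : b < a
        · have hib : (b : Int) < (a : Int) := by exact_mod_cast hba
          rw [if_pos hib, if_pos hba,
            (by push_cast; ring : ((b : Int) + 1) = ((b + 1 : Nat) : Int)),
            ih (cur ++ [')']) a (b + 1) ha (by omega) (by simp [hlen]; omega) (by omega)]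
        · have hib : ¬ ((b : Int) < (a : Int)) := by exact_mod_cast hba
          rw [if_neg hib, if_neg hba]

-- ----- B side: the stack loop yields each popped state's whole subtree output -----

-- What one state contributes: its subtree's leaves, in order.
def subQ (must : List Char) (N : Nat) (s : List Char) (a b : Nat) : List (List Char) :=
  (((allsL (2 * N - (a + b))).filter (okb N a b)).map (s ++ ·)).filter (pvContains must)

theorem runStack_eq (must : List Char) (N : Nat) : ∀ (fuel : Nat)
    (stack : List (List Char × Int × Int)),
    (∀ p ∈ stack, ∃ a b : Nat, p.2.1 = (a : Int) ∧ p.2.2 = (b : Int) ∧ a ≤ N ∧ b ≤ a ∧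
      p.1.length = a + b ∧ a + b ≤ 2 * N) →
    (stack.map (fun p => 2 ^ (2 * N - p.1.length + 1) - 1)).sum ≤ fuel →
    runStack must (N : Int) fuel stack =
      stack.flatMap (fun p => subQ must N p.1 p.2.1.toNat p.2.2.toNat) := by
  intro fuel
  induction fuel with
  | zero =>
    intro stack hinv hsum
    cases stack with
    | nil => simp [runStack]
    | cons p rest =>
      exfalso
      have h1 : 1 ≤ 2 ^ (2 * N - p.1.length + 1) - 1 := by
        have := Nat.one_lt_two_pow_iff.mpr (by omega : 2 * N - p.1.length + 1 ≠ 0)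
        omega
      simp only [List.map_cons, List.sum_cons] at hsum
      omega
  | succ f ih =>
    intro stack hinv hsum
    match stack with
    | [] => simp [runStack]
    | (s, o, c) :: rest =>
      obtain ⟨a, b, hoa, hcb, haN, hba, hlen, hle⟩ := hinv (s, o, c) (List.mem_cons_self ..)
      simp only at hoa hcb hlen hle
      subst hoa hcb
      have hrestinv : ∀ p ∈ rest, ∃ a b : Nat, p.2.1 = (a : Int) ∧ p.2.2 = (b : Int) ∧
          a ≤ N ∧ b ≤ a ∧ p.1.length = a + b ∧ a + b ≤ 2 * N :=
        fun p hp => hinv p (List.mem_cons_of_mem _ hp)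
      simp only [List.map_cons, List.sum_cons] at hsum
      by_cases hleaf : a + b = 2 * N
      · have hg : ((s.length : Int) = 2 * (N : Int)) := by rw [hlen]; push_cast; omega
        rw [runStack, if_pos hg, List.flatMap_cons,
          ih rest hrestinv (by
            have h1 : 1 ≤ 2 ^ (2 * N - s.length + 1) - 1 := by
              have := Nat.one_lt_two_pow_iff.mpr (by omega : 2 * N - s.length + 1 ≠ 0)
              omega
            omega)]
        congr 1
        simp only [Int.toNat_natCast]
        rw [subQ, (by omega : 2 * N - (a + b) = 0)]
        cases h : pvContains must s <;> simp [allsL, okb, h]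
      · have hg : ¬ ((s.length : Int) = 2 * (N : Int)) := by rw [hlen]; push_cast; omega
        rw [runStack, if_neg hg]
        have hr : 2 * N - (a + b) = (2 * N - (a + b) - 1) + 1 := by omega
        set r : Nat := 2 * N - (a + b) - 1 with hrdef
        -- the two (possible) children, with their invariants and weights
        have hwt : ∀ L : List Char, L.length = a + b + 1 →
            2 ^ (2 * N - L.length + 1) - 1 = 2 ^ (r + 1) - 1 := by
          intro L hL
          have hx : 2 * N - L.length = r := by omega
          rw [hx]
        rw [ih _ (by
              intro p hp
              simp only [List.mem_append] at hp
              have hcases : p ∈ (if (a : Int) < (N : Int) then [(s ++ ['('], (a : Int) + 1, (b : Int))] else ([] : List (List Char × Int × Int)))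
                  ∨ p ∈ (if (b : Int) < (a : Int) then [(s ++ [')'], (a : Int), (b : Int) + 1)] else ([] : List (List Char × Int × Int)))
                  ∨ p ∈ rest := by tauto
              rcases hcases with hp1 | hp1 | hp1
              · by_cases hlt : (a : Int) < N
                · rw [if_pos hlt] at hp1
                  obtain rfl := List.mem_singleton.mp hp1
                  exact ⟨a + 1, b, by push_cast; ring, rfl, by exact_mod_cast hlt, by omega,
                    by simp [hlen]; omega, by omega⟩
                · rw [if_neg hlt] at hp1
                  simp at hp1
              · by_cases hlt : (b : Int) < a
                · rw [if_pos hlt] at hp1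
                  obtain rfl := List.mem_singleton.mp hp1
                  exact ⟨a, b + 1, rfl, by push_cast; ring, haN, by exact_mod_cast hlt,
                    by simp [hlen]; omega, by omega⟩
                · rw [if_neg hlt] at hp1
                  simp at hp1
              · exact hrestinv p hp1)
            (by
              have hw1 : ((if (a : Int) < N then [(s ++ ['('], (a : Int) + 1, (b : Int))] else []).map
                  (fun p => 2 ^ (2 * N - p.1.length + 1) - 1)).sum ≤ 2 ^ (r + 1) - 1 := by
                split_ifs
                · simp only [List.map_cons, List.map_nil, List.sum_cons, List.sum_nil,
                    List.length_append, List.length_cons, List.length_nil]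
                  rw [show 2 * N - (s.length + 1) = r from by omega]
                  simp
                · simp
              have hw2 : ((if (b : Int) < a then [(s ++ [')'], (a : Int), (b : Int) + 1)] else []).map
                  (fun p => 2 ^ (2 * N - p.1.length + 1) - 1)).sum ≤ 2 ^ (r + 1) - 1 := by
                split_ifs
                · simp only [List.map_cons, List.map_nil, List.sum_cons, List.sum_nil,
                    List.length_append, List.length_cons, List.length_nil]
                  rw [show 2 * N - (s.length + 1) = r from by omega]
                  simp
                · simp
              have hhead : 2 ^ (2 * N - s.length + 1) - 1 = 2 ^ (r + 2) - 1 := by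
                have hx : 2 * N - s.length + 1 = r + 2 := by omega
                rw [hx]
              have hpow : 2 ^ (r + 2) = 2 * 2 ^ (r + 1) := by ring
              simp only [List.map_append, List.sum_append]
              rw [hhead] at hsum
              have h1 : 1 ≤ 2 ^ (r + 1) := Nat.one_le_two_pow
              omega)]
        rw [List.flatMap_append, List.flatMap_append, List.flatMap_cons]
        congr 1
        · -- the popped state's subtree splits into its (up to two) children's subtrees
          rw [show subQ must N s ((a : Int)).toNat ((b : Int)).toNat = subQ must N s a b from by
            simp]
          rw [subQ, hr, step_split]
          congr 1
          · by_cases haN' : a < N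
            · have hiN : (a : Int) < (N : Int) := by exact_mod_cast haN'
              rw [if_pos hiN, if_pos haN']
              simp only [List.flatMap_cons, List.flatMap_nil, List.append_nil,
                show ((a : Int) + 1) = ((a + 1 : Nat) : Int) from by push_cast; ring,
                Int.toNat_natCast]
              rw [subQ, show 2 * N - (a + 1 + b) = r from by omega]
            · have hiN : ¬ ((a : Int) < (N : Int)) := by exact_mod_cast haN'
              rw [if_neg hiN, if_neg haN']
              simp
          · by_cases hba' : b < a
            · have hib : (b : Int) < (a : Int) := by exact_mod_cast hba'
              rw [if_pos hib, if_pos hba']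
              simp only [List.flatMap_cons, List.flatMap_nil, List.append_nil,
                show ((b : Int) + 1) = ((b + 1 : Nat) : Int) from by push_cast; ring,
                Int.toNat_natCast]
              rw [subQ, show 2 * N - (a + (b + 1)) = r from by omega]
            · have hib : ¬ ((b : Int) < (a : Int)) := by exact_mod_cast hba'
              rw [if_neg hib, if_neg hba']
              simp

-- A equals the filtered leaf-listing of the full tree (the root call of backtrack_eq).
theorem A_closed (must : List Char) (N : Nat) :
    backtrackA must (N : Int) (2 * N) [] 0 0 =
      ((allsL (2 * N)).filter (okb N 0 0)).filter (pvContains must) := by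
  have hA := backtrack_eq must N (2 * N) [] 0 0 (by omega) (le_refl 0) (by simp) (by omega)
  simp only [Int.natCast_zero] at hA
  rw [hA]
  congr 1
  simp

-- ===== VERDICT (by name: the statement is the Claim_ definition above) =====
theorem generate_parentheses_with_constraints_spec : Claim_equal_generate_parentheses_with_constraints := by
  intro n must_include _hdom _hpre
  unfold Spec_generate_parentheses_with_constraints
  unfold generate_parentheses_with_constraints generate_parentheses_with_constraints_alt
  by_cases hn : n < 0
  · -- n < 0: both return [] (B's early-out fires since |must_include| ≥ 0 > 2n)
    rw [if_pos (by omega : (must_include.toList.length : Int) > 2 * n)]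
    have h0 : (2 * n).toNat = 0 := by omega
    have hgA : ¬ ((([] : List Char)).length : Int) = 2 * n := by simp; omega
    rw [h0, backtrackA, if_neg hgA]
    simp
  · set N : Nat := n.toNat with hN
    have hnN : n = (N : Int) := by omega
    rw [hnN, (by omega : ((2 : Int) * (N : Int)).toNat = 2 * N), A_closed]
    by_cases hlong : (must_include.toList.length : Int) > 2 * (N : Int)
    · -- must_include longer than 2n: A's filter is empty, B's early-out returns []
      rw [if_pos hlong]
      have : ((allsL (2 * N)).filter (okb N 0 0)).filter (pvContains must_include.toList) = [] := by
        rw [List.filter_eq_nil_iff]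
        intro t ht
        have htlen : t.length = 2 * N := length_mem_allsL (List.mem_filter.mp ht).1
        intro hcont
        have := contains_length hcont
        omega
      rw [this]
      simp
    · rw [if_neg hlong, runStack_eq must_include.toList N (2 ^ (2 * N + 1)) [([], 0, 0)]
        (by
          intro p hp
          simp only [List.mem_singleton] at hp
          subst hp
          exact ⟨0, 0, rfl, rfl, by omega, le_refl 0, by simp, by omega⟩)
        (by
          simp only [List.map_cons, List.map_nil, List.sum_cons, List.sum_nil]
          have h1 : 1 ≤ 2 ^ (2 * N - ([] : List Char).length + 1) := Nat.one_le_two_pow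
          have : 2 * N - ([] : List Char).length + 1 ≤ 2 * N + 1 := by simp
          have := Nat.pow_le_pow_right (by norm_num : 1 ≤ 2) this
          omega)]
      simp [subQ]
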